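-- pv_equiv track=rewrite | github.com/dacker-team/pyspreadsheet | pyspreadsheet/Spreadsheet.py | get_columns_name
-- ===== SOURCE A (Python) =====
-- def get_columns_name(row):
--     columns_name = []
--     for i in row:
--         if i != '':
--             column_name = str \
--                 .lower(str(i)) \
--                 .strip() \
--                 .replace(" ", "_") \
--                 .replace("(", "") \
--                 .replace(")", "") \
--                 .replace("\n", "_") \
--                 .replace("/", "_") \
--                 .replace("'s", "") \
--                 .replace("-", "_") \
--                 .replace(".", "_")
--             if column_name in columns_name:
--                 column_name = column_name + "_%s" % (str(columns_name.count(column_name) + 1))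
--             columns_name.append(column_name)
--         elif i == '':
--             column_name = "__blank_header_" + str(len(columns_name) + 1)
--             if column_name in columns_name:
--                 column_name = column_name + "%s" % (str(columns_name.count(column_name) + 1))
--             columns_name.append(column_name)
--
--     for i in range(0, len(columns_name)):
--         if "__blank_header_" in columns_name[i]:
--             t = 0
--             for y in range(i, len(columns_name)):
--                 if not ("__blank_header_" in columns_name[y]):
--                     t = 1
--                     break
--             if t == 0:
--                 columns_name = columns_name[:i]
--                 break
--
--     return columns_name
-- ===== SOURCE B (Python) =====
-- def get_columns_name(row):
--     # One fused pass: positional blank names (index formula instead of growing-list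
--     # length), a dict of running counts instead of per-cell list scans, and a
--     # "keep" watermark (index just past the last non-placeholder name) instead of
--     # any trailing-run scan; one final slice does the trim.
--     MARKER = "__blank_header_"
--     counts = {}
--     out = []
--     keep = 0
--     for pos, cell in enumerate(row):
--         if cell == '':
--             base, sep = MARKER + str(pos + 1), ""
--         else:
--             base, sep = (cell.lower().strip()
--                          .replace(" ", "_").replace("(", "").replace(")", "")
--                          .replace("\n", "_").replace("/", "_").replace("'s", "")
--                          .replace("-", "_").replace(".", "_")), "_"
--         dup = counts.get(base, 0)
--         name = base if dup == 0 else base + sep + str(dup + 1)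
--         counts[name] = counts.get(name, 0) + 1
--         out.append(name)
--         if MARKER not in name:
--             keep = len(out)
--     return out[:keep]
-- ===== Notes on version B (the rewrite author's own statement) =====
-- stated objective: faster
-- what changed: B fuses A's two phases into one linear pass: blank names come from the enumerate index (a closed form replacing A's growing-list length), duplicate suffixes from a dict of running counts (replacing A's per-cell list membership and list.count scans), and the trailing-placeholder trim from a 'keep' watermark updated as names are produced (replacing A's quadratic nested forward scan), with a single final slice.
import Mathlib
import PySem

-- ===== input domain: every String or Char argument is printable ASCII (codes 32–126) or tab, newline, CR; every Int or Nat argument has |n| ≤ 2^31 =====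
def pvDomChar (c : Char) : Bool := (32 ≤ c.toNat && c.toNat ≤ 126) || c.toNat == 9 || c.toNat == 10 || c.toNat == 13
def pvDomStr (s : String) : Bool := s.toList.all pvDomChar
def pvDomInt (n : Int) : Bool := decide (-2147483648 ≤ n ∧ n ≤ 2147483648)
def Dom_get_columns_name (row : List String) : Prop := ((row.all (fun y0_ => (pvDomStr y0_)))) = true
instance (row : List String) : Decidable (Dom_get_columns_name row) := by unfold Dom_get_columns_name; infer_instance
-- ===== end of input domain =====

-- B fuses A's two phases into one linear pass: index-formula blank names, a dict of running
-- counts, and a 'keep' watermark that replaces A's nested trailing-placeholder scan (objective: faster).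

-- ===== PORT A =====
-- the normalization chain both Pythons apply to a non-empty cell (identical text in Source A and Source B)
def pvNormalize (s : String) : String :=
  (((((((((PySem.Str.strip (PySem.Str.lower s)).replace " " "_").replace "(" "").replace ")" "").replace "\n" "_").replace "/" "_").replace "'s" "").replace "-" "_").replace "." "_")

-- first for-loop of A: builds columns_name, inner scans are list membership and list.count
def pvPassA : List String → List String → List String
  | [], acc => acc
  | i :: rest, acc =>
    if i ≠ "" then
      let cn := pvNormalize i
      let cn := if cn ∈ acc then cn ++ "_" ++ PySem.Int.toStr ((acc.count cn : Int) + 1) else cn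
      pvPassA rest (acc ++ [cn])
    else
      let cn := "__blank_header_" ++ PySem.Int.toStr ((acc.length : Int) + 1)
      let cn := if cn ∈ acc then cn ++ PySem.Int.toStr ((acc.count cn : Int) + 1) else cn
      pvPassA rest (acc ++ [cn])

-- inner 'for y in range(i, len)' with break: t == 0 iff every remaining name contains the marker
def pvAllBlankA : List String → Bool
  | [] => true
  | y :: r => if PySem.Str.isIn "__blank_header_" y then pvAllBlankA r else false

-- second for-loop of A: first index whose whole suffix is blank headers truncates the list
def pvTrimA (names : List String) (i : Nat) : List String :=
  if h : i < names.length then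
    if PySem.Str.isIn "__blank_header_" names[i] then
      if pvAllBlankA (names.drop i) then names.take i
      else pvTrimA names (i + 1)
    else pvTrimA names (i + 1)
  else names
termination_by names.length - i

def get_columns_name (row : List String) : List String :=
  pvTrimA (pvPassA row []) 0

-- ===== PORT B =====
-- Source B's single for-loop over enumerate(row): pos is the enumerate counter, counts the dict,
-- out the built list, keep the watermark (index past the last non-placeholder name)
def pvLoopB : List String → Nat → PySem.Dict String Int → List String → Nat → List String × Nat
  | [], _, _, out, keep => (out, keep)
  | cell :: rest, pos, counts, out, keep =>
    let bs : String × String :=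
      if cell = "" then ("__blank_header_" ++ PySem.Int.toStr ((pos : Int) + 1), "")
      else (pvNormalize cell, "_")
    let dup := counts.getD bs.1 0
    let name := if dup = 0 then bs.1 else bs.1 ++ bs.2 ++ PySem.Int.toStr (dup + 1)
    let counts := counts.insert name (counts.getD name 0 + 1)
    let out := out ++ [name]
    let keep := if PySem.Str.isIn "__blank_header_" name then keep else out.length
    pvLoopB rest (pos + 1) counts out keep

def get_columns_name_alt (row : List String) : List String :=
  let ok := pvLoopB row 0 PySem.Dict.empty [] 0
  ok.1.take ok.2

-- ===== PRECONDITION & SPEC =====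
def Spec_get_columns_name (row : List String) (out : List String) : Prop := out = get_columns_name_alt row
instance (row : List String) (out : List String) : Decidable (Spec_get_columns_name row out) := by unfold Spec_get_columns_name; infer_instance

-- ===== CLAIM (what is proved, stated in full; the proofs are below) =====
def Claim_equal_get_columns_name : Prop := ∀ (row : List String), Dom_get_columns_name row → Spec_get_columns_name row (get_columns_name row)

-- ===== LEMMAS AND PROOFS =====

-- B's watermark, read off a finished list: reverse scan past the trailing placeholder run
def pvWm (names : List String) : Nat → Nat
  | 0 => 0
  | k + 1 => if PySem.Str.isIn "__blank_header_" (names.getD k "") then pvWm names k else k + 1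

theorem pvWm_append (ns : List String) (n : String) (k : Nat) (hk : k ≤ ns.length) :
    pvWm (ns ++ [n]) k = pvWm ns k := by
  induction k with
  | zero => rfl
  | succ k ih =>
    have hg : (ns ++ [n]).getD k "" = ns.getD k "" := by
      rw [List.getD_eq_getElem?_getD, List.getElem?_append_left (by omega),
        ← List.getD_eq_getElem?_getD]
    simp only [pvWm, hg, ih (by omega)]

theorem pvWm_snoc (ns : List String) (n : String) :
    pvWm (ns ++ [n]) (ns ++ [n]).length =
      if PySem.Str.isIn "__blank_header_" n then pvWm ns ns.length else ns.length + 1 := by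
  have hg : (ns ++ [n]).getD ns.length "" = n := by
    rw [List.getD_eq_getElem?_getD, List.getElem?_append_right (le_refl _)]
    simp
  have h : (ns ++ [n]).length = ns.length + 1 := by simp
  rw [h]
  simp only [pvWm, hg, pvWm_append ns n ns.length (le_refl _)]

-- the joint invariant: counts holds the multiset of acc, pos = |acc|, keep = watermark of acc;
-- then B's loop returns A's first-pass list paired with its watermark
theorem pvLoop_eq (rest : List String) :
    ∀ (acc : List String) (counts : PySem.Dict String Int) (keep : Nat),
      (∀ s, counts.getD s 0 = (acc.count s : Int)) → keep = pvWm acc acc.length →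
      pvLoopB rest acc.length counts acc keep = (pvPassA rest acc, pvWm (pvPassA rest acc) (pvPassA rest acc).length) := by
  induction rest with
  | nil => intro acc counts keep _ hk; simp [pvLoopB, pvPassA, hk]
  | cons cell rest ih =>
    intro acc counts keep hinv hk
    have hinv' : ∀ nm s, ((counts.insert nm (counts.getD nm 0 + 1)).getD s 0) = (((acc ++ [nm]).count s : Nat) : Int) := by
      intro nm s
      rw [PySem.Dict.getD_insert]
      by_cases h : s = nm
      · subst h
        rw [if_pos rfl, hinv s]
        have : (acc ++ [s]).count s = acc.count s + 1 := by simp [List.count_append]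
        rw [this]; push_cast; ring
      · rw [if_neg h, hinv s]
        have : (acc ++ [nm]).count s = acc.count s := by
          simp [List.count_append, Ne.symm h]
        rw [this]
    have step : ∀ nm : String,
        pvLoopB rest (acc.length + 1) (counts.insert nm (counts.getD nm 0 + 1)) (acc ++ [nm])
          (if PySem.Str.isIn "__blank_header_" nm = true then keep else acc.length + 1)
        = (pvPassA rest (acc ++ [nm]), pvWm (pvPassA rest (acc ++ [nm])) (pvPassA rest (acc ++ [nm])).length) := by
      intro nm
      have hlen : (acc ++ [nm]).length = acc.length + 1 := by simp
      have hkeep : (if PySem.Str.isIn "__blank_header_" nm = true then keep else acc.length + 1)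
          = pvWm (acc ++ [nm]) (acc ++ [nm]).length := by
        rw [pvWm_snoc]
        cases hb : PySem.Str.isIn "__blank_header_" nm <;> simp [hk]
      rw [hkeep, ← hlen]
      exact ih (acc ++ [nm]) _ _ (fun s => hinv' nm s) rfl
    simp only [pvLoopB, pvPassA, List.length_append, List.length_cons, List.length_nil]
    by_cases hc : cell = ""
    · rw [if_neg (show ¬(cell ≠ "") by simp [hc]), if_pos hc]
      have hdup := hinv ("__blank_header_" ++ PySem.Int.toStr ((acc.length : Int) + 1))
      by_cases hm : ("__blank_header_" ++ PySem.Int.toStr ((acc.length : Int) + 1)) ∈ acc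
      · have h0 : ¬ (counts.getD ("__blank_header_" ++ PySem.Int.toStr ((acc.length : Int) + 1)) 0 = 0) := by
          rw [hdup]; have := List.count_pos_iff.mpr hm; omega
        rw [if_pos hm, if_neg h0, hdup]
        have hstr : ∀ x : String, x ++ "" ++ PySem.Int.toStr ((acc.count x : Int) + 1)
            = x ++ PySem.Int.toStr ((acc.count x : Int) + 1) := by
          intro x; simp
        rw [hstr]
        exact step _
      · have h0 : counts.getD ("__blank_header_" ++ PySem.Int.toStr ((acc.length : Int) + 1)) 0 = 0 := by
          rw [hdup, List.count_eq_zero.mpr hm]; rfl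
        rw [if_neg hm, if_pos h0]
        exact step _
    · rw [if_pos hc, if_neg (show ¬ cell = "" from hc)]
      have hdup := hinv (pvNormalize cell)
      by_cases hm : pvNormalize cell ∈ acc
      · have h0 : ¬ (counts.getD (pvNormalize cell) 0 = 0) := by
          rw [hdup]; have := List.count_pos_iff.mpr hm; omega
        rw [if_pos hm, if_neg h0, hdup]
        exact step _
      · have h0 : counts.getD (pvNormalize cell) 0 = 0 := by
          rw [hdup, List.count_eq_zero.mpr hm]; rfl
        rw [if_neg hm, if_pos h0]
        exact step _

theorem pvWm_le (names : List String) (k : Nat) : pvWm names k ≤ k := by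
  induction k with
  | zero => simp [pvWm]
  | succ k ih => simp only [pvWm]; split <;> omega

theorem pvWm_blank (names : List String) (k : Nat) :
    ∀ j, pvWm names k ≤ j → j < k → PySem.Str.isIn "__blank_header_" (names.getD j "") = true := by
  induction k with
  | zero => intro j _ h; omega
  | succ k ih =>
    intro j h1 h2
    simp only [pvWm] at h1
    split at h1
    · rename_i hb
      by_cases hj : j < k
      · exact ih j h1 hj
      · have : j = k := by omega
        subst this; exact hb
    · omega

theorem pvWm_boundary (names : List String) (k : Nat) :
    pvWm names k = 0 ∨ PySem.Str.isIn "__blank_header_" (names.getD (pvWm names k - 1) "") = false := by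
  induction k with
  | zero => left; rfl
  | succ k ih =>
    simp only [pvWm]
    split
    · exact ih
    · rename_i hb
      right; simpa using hb

theorem pvAllBlankA_iff (l : List String) :
    pvAllBlankA l = true ↔ ∀ y ∈ l, PySem.Str.isIn "__blank_header_" y = true := by
  induction l with
  | nil => simp [pvAllBlankA]
  | cons y r ih =>
    simp only [pvAllBlankA, List.mem_cons, forall_eq_or_imp]
    cases hI : PySem.Str.isIn "__blank_header_" y
    · simp
    · simp [ih]

theorem pvTrimA_eq_aux (names : List String) :
    ∀ (m i : Nat), names.length - i ≤ m → i ≤ pvWm names names.length →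
      pvTrimA names i = names.take (pvWm names names.length) := by
  intro m
  induction m with
  | zero =>
    intro i hm hiL
    have hLlen := pvWm_le names names.length
    have hL : pvWm names names.length = names.length := by omega
    rw [pvTrimA, dif_neg (by omega), hL, List.take_length]
  | succ m ihm =>
    intro i hm hiL
    have hLlen := pvWm_le names names.length
    rw [pvTrimA]
    by_cases h : i < names.length
    · rw [dif_pos h]
      by_cases hb : PySem.Str.isIn "__blank_header_" names[i] = true
      · rw [if_pos hb]
        by_cases hall : pvAllBlankA (names.drop i) = true
        · rw [if_pos hall]
          have hall' : ∀ j, i ≤ j → j < names.length →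
              PySem.Str.isIn "__blank_header_" (names.getD j "") = true := by
            intro j h1 h2
            have hmem : names[j] ∈ names.drop i := by
              rw [List.mem_iff_getElem]
              refine ⟨j - i, by simp; omega, ?_⟩
              rw [List.getElem_drop]; congr 1; omega
            have := (pvAllBlankA_iff _).mp hall _ hmem
            rwa [List.getD_eq_getElem _ _ h2]
          have hLi : pvWm names names.length ≤ i := by
            by_contra hlt
            rcases pvWm_boundary names names.length with h0 | hnb
            · omega
            · have := hall' (pvWm names names.length - 1) (by omega) (by omega)
              rw [this] at hnb; cases hnb
          have : i = pvWm names names.length := by omega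
          rw [this]
        · rw [if_neg hall]
          have hiL' : i < pvWm names names.length := by
            rcases Nat.lt_or_ge i (pvWm names names.length) with h' | h'
            · exact h'
            · exfalso
              apply hall
              rw [pvAllBlankA_iff]
              intro y hy
              rw [List.mem_iff_getElem] at hy
              obtain ⟨j, hj, rfl⟩ := hy
              rw [List.getElem_drop]
              have h2 : i + j < names.length := by simp at hj; omega
              have := pvWm_blank names names.length (i + j) (by omega) h2
              rwa [List.getD_eq_getElem _ _ h2] at this
          exact ihm (i + 1) (by omega) (by omega)
      · rw [if_neg hb]
        have hiL' : i < pvWm names names.length := by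
          rcases Nat.lt_or_ge i (pvWm names names.length) with h' | h'
          · exact h'
          · exfalso
            have := pvWm_blank names names.length i (by omega) h
            rw [List.getD_eq_getElem _ _ h] at this
            exact hb this
        exact ihm (i + 1) (by omega) (by omega)
    · rw [dif_neg h]
      have : pvWm names names.length = names.length := by omega
      rw [this, List.take_length]

-- ===== VERDICT (by name: the statement is the Claim_ definition above) =====
theorem get_columns_name_spec : Claim_equal_get_columns_name := by
  intro row _
  unfold Spec_get_columns_name get_columns_name get_columns_name_alt
  have h0 : ([] : List String).length = 0 := rfl
  have := pvLoop_eq row [] PySem.Dict.empty 0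
    (by intro s; simp [PySem.Dict.getD_empty]) rfl
  rw [h0] at this
  rw [this]
  show pvTrimA (pvPassA row []) 0 = List.take (pvWm (pvPassA row []) (pvPassA row []).length) (pvPassA row [])
  exact (pvTrimA_eq_aux (pvPassA row []) (pvPassA row []).length 0 (by omega) (Nat.zero_le _))
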